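-- pv_equiv track=rewrite | github.com/ICxodnik/goit-algo-hw-08 | heap_sort/cabel_task.py | took_cables
-- ===== SOURCE A (Python) =====
-- import heapq
--
-- class MaxHeap:
--     def __init__(self, iterable=None):
--         self._heap = []
--         if iterable:
--             self._heap = [-x for x in iterable]
--             heapq.heapify(self._heap)
--
--     def __repr__(self):
--         return f"{self.to_sorted_list()}"
--
--     def push(self, value):
--         heapq.heappush(self._heap, -value)
--
--     def pop(self):
--         return -heapq.heappop(self._heap)
--
--     def is_empty(self):
--         return not self._heap
--
--     def to_sorted_list(self):
--         return sorted([-x for x in self._heap], reverse=True)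
--
--     def sort_desc(iterable):
--         return MaxHeap(iterable).to_sorted_list()
--
-- def took_cables(cables_lengths, required_length):
--     total = 0
--     heap = MaxHeap(cables_lengths)
--     used_cables = []
--
--     while not heap.is_empty() and total < required_length:
--         cable = heap.pop()
--         total += cable
--         used_cables.append(cable)
--
--     remaining = heap.to_sorted_list()
--     return total, remaining
-- ===== SOURCE B (Python) =====
-- def took_cables(cables_lengths, required_length):
--     # sort once descending, then a single pass to the cutoff index
--     ordered = sorted(cables_lengths, reverse=True)
--     total = 0
--     i = 0
--     while i < len(ordered) and total < required_length:
--         total += ordered[i]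
--         i += 1
--     return total, ordered[i:]
-- ===== Notes on version B (the rewrite author's own statement) =====
-- stated objective: simpler
-- what changed: Replaces the MaxHeap class and its destructive one-pop-at-a-time loop with a single sorted(..., reverse=True) followed by one indexed pass to the cutoff, returning the tail slice as the remainder.
import Mathlib
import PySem

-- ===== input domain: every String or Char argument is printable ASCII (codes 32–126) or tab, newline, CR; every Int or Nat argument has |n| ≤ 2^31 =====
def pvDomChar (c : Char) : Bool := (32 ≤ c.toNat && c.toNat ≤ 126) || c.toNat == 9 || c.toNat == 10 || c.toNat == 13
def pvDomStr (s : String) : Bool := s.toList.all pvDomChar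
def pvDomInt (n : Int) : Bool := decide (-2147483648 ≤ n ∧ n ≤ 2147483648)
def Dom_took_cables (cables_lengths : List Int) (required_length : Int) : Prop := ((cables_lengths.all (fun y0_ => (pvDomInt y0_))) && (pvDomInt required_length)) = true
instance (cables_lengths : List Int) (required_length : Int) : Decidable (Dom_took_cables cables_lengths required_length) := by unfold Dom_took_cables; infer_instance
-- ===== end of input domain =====

-- B drops the MaxHeap: sort once descending, then one indexed pass to the cutoff; same return value, simpler code.


-- ===== PORT A =====
-- MaxHeap._heap holds the NEGATED values (as the Python does).  heapq is a stdlib call and is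
-- ported by its observable behaviour on the held multiset: heappop returns the minimum held
-- value (first occurrence removed).  That is exact for every result A observes, since the only
-- other reads of the heap are is_empty and to_sorted_list, which sorts.
-- to_sorted_list(): sorted([-x for x in self._heap], reverse=True)
def pvToSortedList (h : List Int) : List Int :=
  PySem.List.sorted (h.map (fun x => -x)) (fun x => x) true

-- the while loop: while not heap.is_empty() and total < required_length: pop, add, append
def pvALoop (h : List Int) (total : Int) (used : List Int) (req : Int) : Int × List Int :=
  if h ≠ [] ∧ total < req then
    match hm : PySem.List.min? h (fun x => x) with
    | none => (total, [])  -- unreachable: h ≠ []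
    | some m =>
      match hr : PySem.List.remove? h m with
      | none => (total, [])  -- unreachable: m ∈ h
      | some h' => pvALoop h' (total + (-m)) (used ++ [-m]) req
  else
    (total, pvToSortedList h)
termination_by h.length
decreasing_by
  have hmem : m ∈ h := PySem.List.min?_mem hm
  have h1 := PySem.List.remove?_eq_some_erase h m hmem
  rw [h1] at hr
  have h2 : h'.length = h.length - 1 := by
    cases hr; exact List.length_erase_of_mem hmem
  have h3 : 0 < h.length := List.length_pos_of_mem hmem
  omega

def took_cables (cables_lengths : List Int) (required_length : Int) : Int × List Int :=
  pvALoop (cables_lengths.map (fun x => -x)) 0 [] required_length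

-- ===== PORT B =====
-- single pass over the descending-sorted list; stops at the cutoff and returns the tail slice
def pvBScan : List Int → Int → Int → Int × List Int
  | [], total, _ => (total, [])
  | x :: rest, total, req =>
    if total < req then pvBScan rest (total + x) req else (total, x :: rest)

def took_cables_alt (cables_lengths : List Int) (required_length : Int) : Int × List Int :=
  pvBScan (PySem.List.sorted cables_lengths (fun x => x) true) 0 required_length

-- ===== PRECONDITION & SPEC =====
def Spec_took_cables (cables_lengths : List Int) (required_length : Int) (out : Int × List Int) : Prop := out = took_cables_alt cables_lengths required_length
instance (cables_lengths : List Int) (required_length : Int) (out : Int × List Int) : Decidable (Spec_took_cables cables_lengths required_length out) := by unfold Spec_took_cables; infer_instance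

-- ===== CLAIM (what is proved, stated in full; the proofs are below) =====
def Claim_equal_took_cables : Prop := ∀ (cables_lengths : List Int) (required_length : Int), Dom_took_cables cables_lengths required_length → Spec_took_cables cables_lengths required_length (took_cables cables_lengths required_length)

-- ===== LEMMAS AND PROOFS =====

-- once the budget is met (or the list exhausted), pvBScan returns the rest unchanged
lemma pvBScan_of_not_lt (S : List Int) (total req : Int) (h : ¬ total < req) :
    pvBScan S total req = (total, S) := by
  cases S with
  | nil => rfl
  | cons x rest => simp [pvBScan, h]

-- removing the minimum of the multiset = dropping the head of the descending sort of negations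
lemma sorted_rev_cons_of_min (h h' : List Int) (m : Int)
    (hm : PySem.List.min? h (fun x => x) = some m)
    (hr : PySem.List.remove? h m = some h') :
    pvToSortedList h = (-m) :: pvToSortedList h' := by
  have hmem : m ∈ h := PySem.List.min?_mem hm
  have herase : h' = h.erase m := by
    rw [PySem.List.remove?_eq_some_erase h m hmem] at hr
    exact (Option.some.inj hr).symm
  subst herase
  unfold pvToSortedList
  apply List.Perm.eq_of_pairwise (le := fun a b : Int => b ≤ a)
  · intro a b _ _ hab hba; omega
  · exact PySem.List.sorted_pairwise_rev _ _
  · constructor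
    · intro y hy
      have hy' : y ∈ (h.erase m).map (fun x => -x) :=
        (PySem.List.mem_sorted _ _ _ _).mp hy
      obtain ⟨z, hz, rfl⟩ := List.mem_map.mp hy'
      have hz' : z ∈ h := List.mem_of_mem_erase hz
      have := PySem.List.min?_isMin hm z hz'
      simpa using this
    · exact PySem.List.sorted_pairwise_rev _ _
  · -- permutation
    refine (PySem.List.sorted_perm _ _ _).trans ?_
    have h1 : (h.map (fun x => -x)).Perm ((-m) :: (h.erase m).map (fun x => -x)) := by
      have := (List.perm_cons_erase hmem).map (fun x : Int => -x)
      simpa using this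
    refine h1.trans (List.Perm.cons _ ?_)
    exact (PySem.List.sorted_perm _ _ _).symm

-- loop invariant: A's pop loop over the negated multiset = B's scan over the descending sort
lemma pvALoop_eq_scan (h : List Int) (total : Int) (used : List Int) (req : Int) :
    pvALoop h total used req = pvBScan (pvToSortedList h) total req := by
  fun_induction pvALoop h total used req
  case case1 =>
    rename_i h total used hc hmin
    exact absurd ((PySem.List.min?_eq_none_iff _ _).mp hmin) hc.1
  case case2 =>
    rename_i h total used hc m hm hr
    have hmem : m ∈ h := PySem.List.min?_mem hm
    rw [PySem.List.remove?_eq_some_erase h m hmem] at hr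
    exact absurd hr (by simp)
  case case3 =>
    rename_i h total used hc m hm h' hr ih
    rw [ih, sorted_rev_cons_of_min h h' m hm hr]
    simp [pvBScan, hc.2]
  case case4 =>
    rename_i h total used hc
    by_cases hnil : h = []
    · subst hnil
      rfl
    · have hge : ¬ total < req := by
        rcases not_and_or.mp hc with h1 | h2
        · exact absurd hnil (by simpa using h1)
        · exact h2
      rw [pvBScan_of_not_lt _ _ _ hge]

-- double negation: the heap's negated contents sorted back = the cables sorted descending
lemma toSorted_map_neg (xs : List Int) :
    pvToSortedList (xs.map (fun x => -x)) = PySem.List.sorted xs (fun x => x) true := by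
  unfold pvToSortedList
  congr 1
  simp [List.map_map]

-- ===== VERDICT (by name: the statement is the Claim_ definition above) =====
theorem took_cables_spec : Claim_equal_took_cables := by
  intro cables req _
  show took_cables cables req = took_cables_alt cables req
  unfold took_cables took_cables_alt
  rw [pvALoop_eq_scan, toSorted_map_neg]
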